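-- pv_equiv track=rewrite | github.com/jazminasaleh/scraping_CvLac | scraping_gruplac.py | obtener_isbn
-- ===== SOURCE A (Python) =====
-- def obtener_isbn(texto_blockquote):
--     indice_isbn = texto_blockquote.find("ISBN:")
--     if indice_isbn != -1:
--         indice_v = texto_blockquote.find("v.", indice_isbn)
--         indice_ed = texto_blockquote.find("ed:", indice_isbn)
--         indice_p = texto_blockquote.find("p.", indice_isbn)
--
--         topes = [i for i in [indice_v, indice_ed, indice_p] if i != -1]
--         if topes:
--             primer_tope = min(topes)
--             return texto_blockquote[indice_isbn + len("ISBN:"):primer_tope].strip().strip(',')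
--         else:
--             return texto_blockquote[indice_isbn + len("ISBN:"):].strip().strip(',')
--
--     return ""
-- ===== SOURCE B (Python) =====
-- def obtener_isbn(texto_blockquote):
--     i = texto_blockquote.find("ISBN:")
--     if i == -1:
--         return ""
--     rest = texto_blockquote[i + 5:]
--     corte = len(rest)
--     for j in range(len(rest)):
--         if rest.startswith(("v.", "ed:", "p."), j):
--             corte = j
--             break
--     return rest[:corte].strip().strip(',')
-- ===== Notes on version B (the rewrite author's own statement) =====
-- stated objective: alternative
-- what changed: Replaces the three independent full-suffix find() calls plus filter/min selection by a single left-to-right scan of the text after 'ISBN:' that stops at the first position where any of the three markers starts.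
import Mathlib
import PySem

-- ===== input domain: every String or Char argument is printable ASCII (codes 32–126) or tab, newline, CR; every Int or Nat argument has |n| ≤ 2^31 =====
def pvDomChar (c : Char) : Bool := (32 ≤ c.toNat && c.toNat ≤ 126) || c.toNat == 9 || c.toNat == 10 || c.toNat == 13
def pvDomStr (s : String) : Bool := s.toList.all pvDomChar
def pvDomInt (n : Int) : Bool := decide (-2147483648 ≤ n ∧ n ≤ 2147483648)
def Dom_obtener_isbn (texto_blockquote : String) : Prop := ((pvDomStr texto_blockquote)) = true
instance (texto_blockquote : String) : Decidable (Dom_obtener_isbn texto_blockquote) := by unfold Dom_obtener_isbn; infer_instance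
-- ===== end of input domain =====

-- B replaces A's three independent find() passes plus the filter/min selection by one
-- left-to-right scan after "ISBN:" that stops at the first marker (alternative decomposition,
-- same observable result).

-- ===== PORT A =====
def obtener_isbn (texto_blockquote : String) : String :=
  let indice_isbn := PySem.Str.find texto_blockquote "ISBN:"
  if indice_isbn ≠ -1 then
    let indice_v := PySem.Str.findFrom texto_blockquote "v." indice_isbn
    let indice_ed := PySem.Str.findFrom texto_blockquote "ed:" indice_isbn
    let indice_p := PySem.Str.findFrom texto_blockquote "p." indice_isbn
    let topes := [indice_v, indice_ed, indice_p].filter (fun x => x ≠ -1)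
    if topes ≠ [] then
      -- min(topes); the branch guard makes topes nonempty, so getD's default is unreachable
      let primer_tope := (PySem.List.min? topes (fun x => x)).getD 0
      PySem.Str.stripChars
        (PySem.Str.strip (PySem.Str.slice texto_blockquote (some (indice_isbn + 5)) (some primer_tope))) ","
    else
      PySem.Str.stripChars
        (PySem.Str.strip (PySem.Str.slice texto_blockquote (some (indice_isbn + 5)) none)) ","
  else ""

-- ===== PORT B =====
-- rest.startswith(("v.", "ed:", "p."), j) — Python's startswith at offset j is a prefix test
-- on the j-suffix; exact.
def pvMarkerAt (s : List Char) : Bool :=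
  PySem.Chars.startswith s "v.".toList || PySem.Chars.startswith s "ed:".toList ||
    PySem.Chars.startswith s "p.".toList

-- the 'for j in range(len(rest)) … break' loop: first index with a marker, else len(rest)
def pvCorte : List Char → Nat
  | [] => 0
  | c :: cs => if pvMarkerAt (c :: cs) then 0 else pvCorte cs + 1

def obtener_isbn_alt (texto_blockquote : String) : String :=
  let i := PySem.Str.find texto_blockquote "ISBN:"
  if i == -1 then ""
  else
    let rest := PySem.Str.slice texto_blockquote (some (i + 5)) none
    PySem.Str.stripChars
      (PySem.Str.strip (String.ofList (rest.toList.take (pvCorte rest.toList)))) ","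

-- ===== PRECONDITION & SPEC =====
def Spec_obtener_isbn (texto_blockquote : String) (out : String) : Prop := out = obtener_isbn_alt texto_blockquote
instance (texto_blockquote : String) (out : String) : Decidable (Spec_obtener_isbn texto_blockquote out) := by unfold Spec_obtener_isbn; infer_instance

-- ===== CLAIM (what is proved, stated in full; the proofs are below) =====
def Claim_equal_obtener_isbn : Prop := ∀ (texto_blockquote : String), Dom_obtener_isbn texto_blockquote → Spec_obtener_isbn texto_blockquote (obtener_isbn texto_blockquote)

-- ===== LEMMAS AND PROOFS =====

-- no marker strictly before pvCorte
theorem pvCorte_not_before (s : List Char) :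
    ∀ j < pvCorte s, pvMarkerAt (s.drop j) = false := by
  induction s with
  | nil => simp [pvCorte]
  | cons c cs ih =>
    intro j hj
    simp only [pvCorte] at hj
    by_cases hm : pvMarkerAt (c :: cs) = true
    · simp [hm] at hj
    · simp only [if_neg hm] at hj
      cases j with
      | zero => simpa using hm
      | succ j => exact ih j (by omega)

-- a marker sits at pvCorte unless pvCorte ran off the end
theorem pvCorte_marker (s : List Char) :
    pvCorte s = s.length ∨ pvMarkerAt (s.drop (pvCorte s)) = true := by
  induction s with
  | nil => left; simp [pvCorte]
  | cons c cs ih =>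
    simp only [pvCorte]
    by_cases hm : pvMarkerAt (c :: cs) = true
    · right; simpa [hm]
    · rcases ih with h | h
      · left; simp [hm, h]
      · right; simpa [hm] using h

-- pvCorte is ≤ any index carrying a marker
theorem pvCorte_le_of_marker (s : List Char) (j : Nat) (h : pvMarkerAt (s.drop j) = true) :
    pvCorte s ≤ j := by
  by_contra hlt
  have := pvCorte_not_before s j (by omega)
  simp [this] at h

-- a marker somewhere in the suffix is a marker prefix at some offset
theorem pvMarkerAt_iff (s : List Char) :
    pvMarkerAt s = true ↔
      ("v.".toList <+: s ∨ "ed:".toList <+: s ∨ "p.".toList <+: s) := by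
  simp [pvMarkerAt, PySem.Chars.startswith_iff, or_assoc]

-- markers cannot start inside the matched "ISBN:" literal
theorem no_marker_in_isbn (L : List Char) (n : Nat)
    (hpre : "ISBN:".toList <+: L.drop n) (j : Nat) (hj1 : n ≤ j) (hj2 : j < n + 5) :
    pvMarkerAt (L.drop j) = false := by
  rw [Bool.eq_false_iff]
  intro hmk
  rw [pvMarkerAt_iff] at hmk
  obtain ⟨k, rfl⟩ : ∃ k, j = n + k := ⟨j - n, by omega⟩
  have hk5 : k < 5 := by omega
  have hd : "ISBN:".toList.drop k <+: L.drop (n + k) := by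
    have h := hpre.drop k
    rwa [List.drop_drop] at h
  have e1 := hd.getElem (i := 0) (by simp; omega)
  rcases hmk with h | h | h <;>
    [have e2 := h.getElem (i := 0) (by decide);
     have e2 := h.getElem (i := 0) (by decide);
     have e2 := h.getElem (i := 0) (by decide)] <;>
  · rw [← e2] at e1
    interval_cases k <;> simp_all

-- a marker prefix at or after n+5 is an infix of the suffix at n
theorem infix_of_prefix_drop (L m : List Char) (n j : Nat) (hnj : n ≤ j)
    (h : m <+: L.drop j) : m <:+: L.drop n := by
  have hs : L.drop j <:+ L.drop n := by
    have := List.drop_suffix (j - n) (L.drop n)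
    rwa [List.drop_drop, show n + (j - n) = j by omega] at this
  exact h.isInfix.trans hs.isInfix

-- a non-(-1) findFrom result for one of the three markers: it lies past the literal,
-- carries a marker, and nothing earlier (≥ n) is an occurrence of that marker
theorem tope_spec (L m : List Char) (n : Nat) (hk : n + 5 ≤ L.length)
    (hpre : "ISBN:".toList <+: L.drop n)
    (hmm : m = "v.".toList ∨ m = "ed:".toList ∨ m = "p.".toList)
    (hF : PySem.Chars.findFrom L m (n : Int) none ≠ -1) :
    n + 5 ≤ (PySem.Chars.findFrom L m (n : Int) none).toNat ∧
      pvMarkerAt (L.drop (PySem.Chars.findFrom L m (n : Int) none).toNat) = true ∧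
      (∀ i, n ≤ i → i < (PySem.Chars.findFrom L m (n : Int) none).toNat → ¬ m <+: L.drop i) := by
  obtain ⟨h1, h2, h3⟩ := PySem.Chars.findFrom_natCast_spec L m n (by omega) hF
  have hmk : pvMarkerAt (L.drop (PySem.Chars.findFrom L m (n : Int) none).toNat) = true := by
    rw [pvMarkerAt_iff]; rcases hmm with rfl | rfl | rfl <;> tauto
  refine ⟨?_, hmk, h3⟩
  by_contra hc
  have h1' : n ≤ (PySem.Chars.findFrom L m (n : Int) none).toNat := by omega
  have hlow := no_marker_in_isbn L n hpre _ h1' (by omega)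
  rw [hlow] at hmk
  exact Bool.false_ne_true hmk

-- the heart: on any input the two ports agree
theorem main_eq (t : String) : obtener_isbn t = obtener_isbn_alt t := by
  by_cases h0 : PySem.Str.find t "ISBN:" = -1
  · rw [PySem.Str.find_eq] at h0
    simp only [obtener_isbn, obtener_isbn_alt, PySem.Str.find_eq, h0]
    simp
  · have hf : PySem.Str.find t "ISBN:" = PySem.Chars.find t.toList "ISBN:".toList :=
      PySem.Str.find_eq t _
    set L := t.toList with hL
    set f := PySem.Chars.find L "ISBN:".toList with hfdef
    rw [hf] at h0
    have hfge : 0 ≤ f := by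
      have := PySem.Chars.neg_one_le_find L "ISBN:".toList
      rw [← hfdef] at this
      omega
    set n := f.toNat with hn
    have hfn : f = (n : Int) := (Int.toNat_of_nonneg hfge).symm
    have hpre : "ISBN:".toList <+: L.drop n := (PySem.Chars.find_spec (by omega)).1
    have h5 : ("ISBN:".toList).length = 5 := rfl
    have hlen5 : n + 5 ≤ L.length := by
      have hle := hpre.length_le
      rw [h5, List.length_drop] at hle
      by_contra hc
      have : L.length - n < 5 := by omega
      omega
    set r := L.drop (n + 5) with hr
    have hrlen : r.length = L.length - (n + 5) := by rw [hr, List.length_drop]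
    have hdrop : ∀ k : Nat, r.drop k = L.drop (n + 5 + k) := by
      intro k; rw [hr, List.drop_drop]
    simp only [obtener_isbn, obtener_isbn_alt, PySem.Str.find_eq, PySem.Str.findFrom_eq, ← hL,
      ← hfdef, if_pos h0]
    have hb : (f == -1) = false := by simpa using h0
    simp only [hb, Bool.false_eq_true, if_false]
    have htl : (PySem.Str.slice t (some (f + 5)) none).toList = r := by
      rw [PySem.Str.toList_slice, PySem.Chars.slice_eq_listSlice, ← hL,
        PySem.List.slice_from L (by omega), show (f + 5).toNat = n + 5 by omega, ← hr]
    rw [show pvCorte (PySem.Str.slice t (some (f + 5)) none).toList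
          = pvCorte r by rw [htl],
        htl]
    by_cases htop : (List.filter (fun x => decide (x ≠ -1))
        [PySem.Chars.findFrom L "v.".toList f none, PySem.Chars.findFrom L "ed:".toList f none,
          PySem.Chars.findFrom L "p.".toList f none]) = []
    · -- no tope: every findFrom is -1, so no marker anywhere in r
      rw [if_neg (by simpa using htop)]
      have hnone : ∀ m : List Char, m = "v.".toList ∨ m = "ed:".toList ∨ m = "p.".toList →
          PySem.Chars.findFrom L m f none = -1 := by
        intro m hmm
        by_contra hc
        have hmem : PySem.Chars.findFrom L m f none ∈ List.filter (fun x => decide (x ≠ -1))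
            [PySem.Chars.findFrom L "v.".toList f none, PySem.Chars.findFrom L "ed:".toList f none,
              PySem.Chars.findFrom L "p.".toList f none] := by
          refine List.mem_filter.mpr ⟨?_, by simpa using hc⟩
          rcases hmm with rfl | rfl | rfl <;> simp
        rw [htop] at hmem
        simp at hmem
      have hnoinf : ∀ m : List Char, m = "v.".toList ∨ m = "ed:".toList ∨ m = "p.".toList →
          ¬ m <:+: L.drop n := by
        intro m hmm
        have := hnone m hmm
        rw [hfn] at this
        exact (PySem.Chars.findFrom_natCast_eq_neg_one_iff L m n (by omega)).mp this
      have hcor : pvCorte r = r.length := by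
        rcases pvCorte_marker r with hc | hc
        · exact hc
        · exfalso
          rw [hdrop, pvMarkerAt_iff] at hc
          rcases hc with h | h | h
          · exact hnoinf _ (Or.inl rfl) (infix_of_prefix_drop L _ n _ (by omega) h)
          · exact hnoinf _ (Or.inr (Or.inl rfl)) (infix_of_prefix_drop L _ n _ (by omega) h)
          · exact hnoinf _ (Or.inr (Or.inr rfl)) (infix_of_prefix_drop L _ n _ (by omega) h)
      rw [hcor, List.take_of_length_le (le_refl _)]
      apply congrArg (fun s => PySem.Str.stripChars (PySem.Str.strip s) ",")
      apply String.toList_inj.mp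
      rw [htl, String.toList_ofList]
    · -- some tope: the min of the finds is exactly n + 5 + pvCorte r
      rw [if_pos (by simpa using htop)]
      obtain ⟨pm, hpm⟩ : ∃ pm, PySem.List.min? (List.filter (fun x => decide (x ≠ -1))
          [PySem.Chars.findFrom L "v.".toList f none, PySem.Chars.findFrom L "ed:".toList f none,
            PySem.Chars.findFrom L "p.".toList f none]) (fun x => x) = some pm := by
        cases hmin : PySem.List.min? (List.filter (fun x => decide (x ≠ -1))
            [PySem.Chars.findFrom L "v.".toList f none, PySem.Chars.findFrom L "ed:".toList f none,
              PySem.Chars.findFrom L "p.".toList f none]) (fun x => x) with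
        | none => exact absurd ((PySem.List.min?_eq_none_iff _ _).mp hmin) htop
        | some pm => exact ⟨pm, rfl⟩
      rw [hpm, Option.getD_some]
      have hpmmem := PySem.List.min?_mem hpm
      have hpmfil := List.mem_filter.mp hpmmem
      have hpmne : pm ≠ -1 := by simpa using hpmfil.2
      obtain ⟨m0, hmm0, hpmeq⟩ : ∃ m0, (m0 = "v.".toList ∨ m0 = "ed:".toList ∨ m0 = "p.".toList) ∧
          pm = PySem.Chars.findFrom L m0 f none := by
        have := hpmfil.1
        simp only [List.mem_cons, List.not_mem_nil, or_false] at this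
        rcases this with h | h | h
        · exact ⟨_, Or.inl rfl, h⟩
        · exact ⟨_, Or.inr (Or.inl rfl), h⟩
        · exact ⟨_, Or.inr (Or.inr rfl), h⟩
      rw [hfn] at hpmeq
      obtain ⟨hP5, hPmk, hPmin⟩ := tope_spec L m0 n hlen5 hpre hmm0 (by rw [← hpmeq]; exact hpmne)
      rw [← hpmeq] at hP5 hPmk hPmin
      have hpm0 : 0 < pm := by omega
      have hdc : r.take (pvCorte r) = r.take (pm.toNat - (n + 5)) := by
        have hc_le : pvCorte r ≤ pm.toNat - (n + 5) := by
          apply pvCorte_le_of_marker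
          rw [hdrop, show n + 5 + (pm.toNat - (n + 5)) = pm.toNat by omega]
          exact hPmk
        rcases pvCorte_marker r with hcl | hcm
        · rw [hcl, List.take_of_length_le (le_refl _),
            List.take_of_length_le (by omega : r.length ≤ pm.toNat - (n + 5))]
        · obtain ⟨m1, hmm1, hpref⟩ : ∃ m1,
              (m1 = "v.".toList ∨ m1 = "ed:".toList ∨ m1 = "p.".toList) ∧
                m1 <+: L.drop (n + 5 + pvCorte r) := by
            rw [hdrop, pvMarkerAt_iff] at hcm
            rcases hcm with h | h | h
            · exact ⟨_, Or.inl rfl, h⟩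
            · exact ⟨_, Or.inr (Or.inl rfl), h⟩
            · exact ⟨_, Or.inr (Or.inr rfl), h⟩
          have hinf : m1 <:+: L.drop n :=
            infix_of_prefix_drop L m1 n (n + 5 + pvCorte r) (by omega) hpref
          have hF1 : PySem.Chars.findFrom L m1 (n : Int) none ≠ -1 := by
            intro hc
            exact (PySem.Chars.findFrom_natCast_eq_neg_one_iff L m1 n (by omega)).mp hc hinf
          obtain ⟨hQ5, hQmk, hQmin⟩ := tope_spec L m1 n hlen5 hpre hmm1 hF1
          have hF1le : (PySem.Chars.findFrom L m1 (n : Int) none).toNat ≤ n + 5 + pvCorte r := by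
            by_contra hc
            exact hQmin (n + 5 + pvCorte r) (by omega) (by omega) hpref
          have hmemF1 : PySem.Chars.findFrom L m1 f none ∈ List.filter (fun x => decide (x ≠ -1))
              [PySem.Chars.findFrom L "v.".toList f none, PySem.Chars.findFrom L "ed:".toList f none,
                PySem.Chars.findFrom L "p.".toList f none] := by
            refine List.mem_filter.mpr ⟨?_, by rw [hfn]; simpa using hF1⟩
            rcases hmm1 with rfl | rfl | rfl <;> simp
          have hple : pm ≤ PySem.Chars.findFrom L m1 f none :=
            PySem.List.min?_isMin hpm _ hmemF1
          rw [hfn] at hple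
          have : pm.toNat - (n + 5) = pvCorte r := by omega
          rw [this]
      apply congrArg (fun s => PySem.Str.stripChars (PySem.Str.strip s) ",")
      apply String.toList_inj.mp
      rw [PySem.Str.toList_slice, PySem.Chars.slice_eq_listSlice, ← hL, String.toList_ofList,
        PySem.List.slice_toNat L (by omega) (by omega),
        show (f + 5).toNat = n + 5 by omega, ← hr, hdc]

-- ===== VERDICT (by name: the statement is the Claim_ definition above) =====
theorem obtener_isbn_spec : Claim_equal_obtener_isbn := by
  intro t _
  unfold Spec_obtener_isbn
  exact main_eq t
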